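-- pv_equiv track=rewrite | github.com/shinyquagsire23/monado | scripts/generate_vk_helpers.py | generate_ext_check
-- ===== SOURCE A (Python) =====
-- from typing import Callable, Iterable, List, Optional
--
-- def wrap_condition(condition):
--     if "defined" in condition:
--         return condition
--     return "defined({})".format(condition)
--
-- def compute_condition(pp_conditions):
--     if not pp_conditions:
--         return None
--     return " && ".join(wrap_condition(x) for x in pp_conditions)
--
-- class ConditionalGenerator:
--     """Keep track of conditions to avoid unneeded repetition of ifdefs."""
--
--     def __init__(self):
--         self.current_condition = None
--
--     def process_condition(self, new_condition: Optional[str]) -> Optional[str]: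
--         """Return a line (or lines) to yield if required based on the new condition state."""
--         lines = []
--         if self.current_condition and new_condition != self.current_condition:
--             # Close current condition if required.
--             lines.append("#endif // {}".format(self.current_condition))
--             # empty line
--             lines.append("")
--             self.current_condition = None
--
--         if new_condition != self.current_condition:
--             # Open new condition if required
--             lines.append("#if {}".format(new_condition))
--             self.current_condition = new_condition
--
--         if lines:
--             return "\n".join(lines)
--
--     def finish(self) -> Optional[str]:
--         """Return a line (or lines) to yield if required at the end of the loop."""
--         return self.process_condition(None)
--
-- def make_ext_member_name(ext: str):
--     return "has_{}".format(ext[3:])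
--
-- def make_ext_name_define(ext: str):
--     str = ext.upper()
--     str = str.replace("1", "_1")
--     str = str.replace("2", "_2")
--     str = str.replace("3", "_3")
--     str = str.replace("4", "_4")
--
--     return "{}_EXTENSION_NAME".format(str)
--
-- def generate_ext_check(exts):
--     yield "\t// Reset before filling out."
--
--     for ext in exts:
--         yield "\tvk->{} = false;".format(make_ext_member_name(ext))
--
--     yield ""
--     yield "\tconst char *const *exts = u_string_list_get_data(ext_list);"
--     yield "\tuint32_t ext_count = u_string_list_get_size(ext_list);"
--     yield ""
--     yield "\tfor (uint32_t i = 0; i < ext_count; i++) {"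
--     yield "\t\tconst char *ext = exts[i];"
--     yield ""
--
--     conditional = ConditionalGenerator()
--     for ext in exts:
--         condition_line = conditional.process_condition(compute_condition((ext,)))
--         if condition_line:
--             yield condition_line
--         yield "\t\tif (strcmp(ext, {}) == 0) {{".format(make_ext_name_define(ext))
--         yield "\t\t\tvk->{} = true;".format(make_ext_member_name(ext))
--         yield "\t\t\tcontinue;"
--         yield "\t\t}"
--     # close any trailing conditions
--     condition_line = conditional.finish()
--     if condition_line:
--         yield condition_line
--     yield "\t}"
-- ===== SOURCE B (Python) =====
-- def _cond(ext):
--     return ext if "defined" in ext else "defined({})".format(ext)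
--
--
-- def _member(ext):
--     return "has_{}".format(ext[3:])
--
--
-- def _define(ext):
--     s = ext.upper()
--     for d in "1234":
--         s = s.replace(d, "_" + d)
--     return "{}_EXTENSION_NAME".format(s)
--
--
-- def generate_ext_check(exts):
--     yield "\t// Reset before filling out."
--
--     for ext in exts:
--         yield "\tvk->{} = false;".format(_member(ext))
--
--     yield ""
--     yield "\tconst char *const *exts = u_string_list_get_data(ext_list);"
--     yield "\tuint32_t ext_count = u_string_list_get_size(ext_list);"
--     yield ""
--     yield "\tfor (uint32_t i = 0; i < ext_count; i++) {"
--     yield "\t\tconst char *ext = exts[i];"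
--     yield ""
--
--     # Two-pointer grouping of consecutive extensions sharing one condition:
--     # each maximal run is emitted as "#if"/body/"#endif" without per-element state.
--     n = len(exts)
--     i = 0
--     prev = None
--     while i < n:
--         c = _cond(exts[i])
--         j = i
--         while j < n and _cond(exts[j]) == c:
--             j += 1
--         if prev is None:
--             yield "#if {}".format(c)
--         else:
--             yield "#endif // {}\n\n#if {}".format(prev, c)
--         for ext in exts[i:j]:
--             yield "\t\tif (strcmp(ext, {}) == 0) {{".format(_define(ext))
--             yield "\t\t\tvk->{} = true;".format(_member(ext))
--             yield "\t\t\tcontinue;"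
--             yield "\t\t}"
--         prev = c
--         i = j
--     if prev is not None:
--         yield "#endif // {}\n".format(prev)
--     yield "\t}"
-- ===== Notes on version B (the rewrite author's own statement) =====
-- stated objective: alternative
-- what changed: Replaces the ConditionalGenerator ifdef state machine with a two-pointer pass that finds each maximal run of consecutive extensions sharing one preprocessor condition and emits the run's #if header, bodies and #endif as a group.
import Mathlib
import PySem

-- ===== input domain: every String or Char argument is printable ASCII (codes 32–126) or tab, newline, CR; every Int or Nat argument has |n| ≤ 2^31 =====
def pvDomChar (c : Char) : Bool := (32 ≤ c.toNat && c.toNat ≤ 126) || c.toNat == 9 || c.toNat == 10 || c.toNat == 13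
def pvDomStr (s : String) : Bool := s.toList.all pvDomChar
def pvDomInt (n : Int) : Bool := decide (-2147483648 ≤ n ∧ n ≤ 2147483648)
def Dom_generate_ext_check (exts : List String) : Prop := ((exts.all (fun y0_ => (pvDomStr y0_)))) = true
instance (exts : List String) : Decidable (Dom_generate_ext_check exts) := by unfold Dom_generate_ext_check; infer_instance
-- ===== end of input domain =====

-- B replaces A's ConditionalGenerator ifdef state machine by a two-pointer pass that emits
-- each maximal run of equal-condition extensions as one "#if …"/bodies/"#endif …" group
-- (objective: alternative decomposition, same cost).

-- ===== PORT A =====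
def wrapCondition (condition : String) : String :=
  if PySem.Str.isIn "defined" condition then condition
  else "defined(" ++ condition ++ ")"

def computeCondition (ppConditions : List String) : Option String :=
  if ppConditions = [] then none
  else some (PySem.Str.join " && " (ppConditions.map wrapCondition))

-- ConditionalGenerator.process_condition: state = current_condition; returns (line-to-yield?, new state)
def processCondition (cur : Option String) (newC : Option String) : Option String × Option String :=
  -- `if self.current_condition and new_condition != self.current_condition`
  let (lines, cur) :=
    match cur with
    | some c =>
        if c ≠ "" ∧ newC ≠ some c then
          (["#endif // " ++ c, ""], (none : Option String))
        else ([], some c)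
    | none => ([], (none : Option String))
  let (lines, cur) :=
    if newC ≠ cur then
      (lines ++ [(match newC with
                  | some c => "#if " ++ c
                  | none => "#if None")], newC)   -- str.format(None) prints "None"
    else (lines, cur)
  (if lines ≠ [] then some (PySem.Str.join "\n" lines) else none, cur)

def makeExtMemberName (ext : String) : String :=
  "has_" ++ PySem.Str.slice ext (some 3) none

def makeExtNameDefine (ext : String) : String :=
  let s := PySem.Str.upper ext
  let s := PySem.Str.replace s "1" "_1"
  let s := PySem.Str.replace s "2" "_2"
  let s := PySem.Str.replace s "3" "_3"
  let s := PySem.Str.replace s "4" "_4"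
  s ++ "_EXTENSION_NAME"

def generate_ext_check (exts : List String) : List String :=
  ["\t// Reset before filling out."]
  ++ exts.map (fun ext => "\tvk->" ++ makeExtMemberName ext ++ " = false;")
  ++ ["",
      "\tconst char *const *exts = u_string_list_get_data(ext_list);",
      "\tuint32_t ext_count = u_string_list_get_size(ext_list);",
      "",
      "\tfor (uint32_t i = 0; i < ext_count; i++) {",
      "\t\tconst char *ext = exts[i];",
      ""]
  ++ (let st := exts.foldl
        (fun (st : List String × Option String) ext =>
          let p := processCondition st.2 (computeCondition [ext])
          (st.1
            ++ (match p.1 with | some l => [l] | none => [])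
            ++ ["\t\tif (strcmp(ext, " ++ makeExtNameDefine ext ++ ") == 0) {",
                "\t\t\tvk->" ++ makeExtMemberName ext ++ " = true;",
                "\t\t\tcontinue;",
                "\t\t}"], p.2))
        ([], none)
      let fin := processCondition st.2 none
      st.1 ++ (match fin.1 with | some l => [l] | none => []) ++ ["\t}"])

-- ===== PORT B =====
def bCond (ext : String) : String :=
  if PySem.Str.isIn "defined" ext then ext else "defined(" ++ ext ++ ")"

def bMember (ext : String) : String :=
  "has_" ++ PySem.Str.slice ext (some 3) none

def bDefine (ext : String) : String :=
  (("1234" : String).toList.foldl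
    (fun s d => PySem.Str.replace s (String.ofList [d]) ("_" ++ String.ofList [d]))
    (PySem.Str.upper ext)) ++ "_EXTENSION_NAME"

def bBody (ext : String) : List String :=
  ["\t\tif (strcmp(ext, " ++ bDefine ext ++ ") == 0) {",
   "\t\t\tvk->" ++ bMember ext ++ " = true;",
   "\t\t\tcontinue;",
   "\t\t}"]

-- the two-pointer while loop: each step consumes one maximal equal-condition run
def bGroups (prev : Option String) (rest : List String) : List String :=
  match rest with
  | [] =>
      (match prev with
       | some p => ["#endif // " ++ p ++ "\n"]
       | none => []) ++ ["\t}"]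
  | e :: tl =>
      let c := bCond e
      let grp := e :: tl.takeWhile (fun x => bCond x == c)
      let rest' := tl.dropWhile (fun x => bCond x == c)
      (match prev with
       | none => ["#if " ++ c]
       | some p => ["#endif // " ++ p ++ "\n\n#if " ++ c])
      ++ grp.flatMap bBody
      ++ bGroups (some c) rest'
termination_by rest.length
decreasing_by
  simp only [List.length_cons]
  exact Nat.lt_succ_of_le (List.length_dropWhile_le _ _)

def generate_ext_check_alt (exts : List String) : List String :=
  ["\t// Reset before filling out."]
  ++ exts.map (fun ext => "\tvk->" ++ bMember ext ++ " = false;")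
  ++ ["",
      "\tconst char *const *exts = u_string_list_get_data(ext_list);",
      "\tuint32_t ext_count = u_string_list_get_size(ext_list);",
      "",
      "\tfor (uint32_t i = 0; i < ext_count; i++) {",
      "\t\tconst char *ext = exts[i];",
      ""]
  ++ bGroups none exts

-- ===== PRECONDITION & SPEC =====
def Spec_generate_ext_check (exts : List String) (out : List String) : Prop := out = generate_ext_check_alt exts
instance (exts : List String) (out : List String) : Decidable (Spec_generate_ext_check exts out) := by unfold Spec_generate_ext_check; infer_instance

-- ===== CLAIM (what is proved, stated in full; the proofs are below) =====
def Claim_equal_generate_ext_check : Prop := ∀ (exts : List String), Dom_generate_ext_check exts → Spec_generate_ext_check exts (generate_ext_check exts)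

-- ===== LEMMAS AND PROOFS =====

-- The two condition helpers agree.
theorem wrapCondition_eq_bCond (e : String) : wrapCondition e = bCond e := rfl

-- Conditions are never the empty string (so the generator's truthiness test always passes).
theorem bCond_ne_empty (e : String) : bCond e ≠ "" := by
  unfold bCond
  split
  · rename_i h
    intro he; subst he
    rw [PySem.Str.isIn_iff_infix] at h
    simp at h
  · intro h
    have := congrArg String.toList h
    simp [String.toList_append] at this

theorem computeCondition_singleton (e : String) :
    computeCondition [e] = some (bCond e) := by
  have hjoin : PySem.Str.join " && " [wrapCondition e] = wrapCondition e := by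
    apply String.toList_inj.mp
    simp [PySem.Str.join, PySem.Chars.join, List.intercalate]
  rw [wrapCondition_eq_bCond] at hjoin
  simp [computeCondition, wrapCondition_eq_bCond, hjoin]

-- processCondition on the four reachable state transitions
theorem processCondition_none (c : String) :
    processCondition none (some c) = (some ("#if " ++ c), some c) := by
  have : PySem.Str.join "\n" ["#if " ++ c] = "#if " ++ c := by
    apply String.toList_inj.mp
    simp [PySem.Str.join, PySem.Chars.join, List.intercalate]
  simp [processCondition, this]

theorem processCondition_same (c : String) (hc : c ≠ "") :
    processCondition (some c) (some c) = (none, some c) := by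
  simp [processCondition, hc]

theorem processCondition_change (c c' : String) (hc : c ≠ "") (hne : c' ≠ c) :
    processCondition (some c) (some c') =
      (some ("#endif // " ++ c ++ "\n\n#if " ++ c'), some c') := by
  have hjoin : PySem.Str.join "\n" ["#endif // " ++ c, "", "#if " ++ c'] =
      "#endif // " ++ c ++ "\n\n#if " ++ c' := by
    apply String.toList_inj.mp
    simp [PySem.Str.join, PySem.Chars.join, String.toList_append, List.intercalate,
      List.intersperse]
  simp [processCondition, hc, hne, hjoin]

theorem processCondition_finish (c : String) (hc : c ≠ "") :
    processCondition (some c) none = (some ("#endif // " ++ c ++ "\n"), none) := by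
  have hjoin : PySem.Str.join "\n" ["#endif // " ++ c, ""] = "#endif // " ++ c ++ "\n" := by
    apply String.toList_inj.mp
    simp [PySem.Str.join, PySem.Chars.join, String.toList_append, List.intercalate,
      List.intersperse]
  simp [processCondition, hc, hjoin]

-- A's per-extension body equals B's (the name helpers are definitionally equal).
theorem bodyA_eq_bBody (ext : String) :
    ["\t\tif (strcmp(ext, " ++ makeExtNameDefine ext ++ ") == 0) {",
     "\t\t\tvk->" ++ makeExtMemberName ext ++ " = true;",
     "\t\t\tcontinue;",
     "\t\t}"] = bBody ext := rfl

-- A's conditional loop + finish, written as structural recursion on the extension list.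
def procA (cur : Option String) (l : List String) : List String :=
  match l with
  | [] =>
      (match (processCondition cur none).1 with | some s => [s] | none => []) ++ ["\t}"]
  | e :: tl =>
      let p := processCondition cur (computeCondition [e])
      (match p.1 with | some s => [s] | none => []) ++ bBody e ++ procA p.2 tl

-- A's left fold with an output accumulator computes procA.
theorem foldA_eq_procA (l : List String) (out : List String) (cur : Option String) :
    (let st := l.foldl
        (fun (st : List String × Option String) ext =>
          let p := processCondition st.2 (computeCondition [ext])
          (st.1
            ++ (match p.1 with | some l => [l] | none => [])
            ++ ["\t\tif (strcmp(ext, " ++ makeExtNameDefine ext ++ ") == 0) {",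
                "\t\t\tvk->" ++ makeExtMemberName ext ++ " = true;",
                "\t\t\tcontinue;",
                "\t\t}"], p.2))
        (out, cur)
     let fin := processCondition st.2 none
     st.1 ++ (match fin.1 with | some l => [l] | none => []) ++ ["\t}"])
    = out ++ procA cur l := by
  induction l generalizing out cur with
  | nil => simp [procA]
  | cons e tl ih =>
      simp only [List.foldl_cons]
      rw [ih]
      simp [procA, bodyA_eq_bBody]

-- Inside a run of equal conditions, procA emits only the bodies.
theorem procA_absorb (tl : List String) (c : String) (hc : c ≠ "") :
    procA (some c) tl =
      (tl.takeWhile (fun x => bCond x == c)).flatMap bBody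
        ++ procA (some c) (tl.dropWhile (fun x => bCond x == c)) := by
  induction tl with
  | nil => simp
  | cons x xs ih =>
      by_cases hx : bCond x = c
      · simp only [List.takeWhile_cons, List.dropWhile_cons, hx, beq_self_eq_true, if_true]
        rw [procA, computeCondition_singleton, hx, processCondition_same c hc]
        simp [ih]
      · simp [hx]

-- Main loop equivalence: A's state machine = B's run-at-a-time grouping.
theorem bGroups_cons (prev : Option String) (e : String) (tl : List String) :
    bGroups prev (e :: tl) =
      (match prev with
       | none => ["#if " ++ bCond e]
       | some p => ["#endif // " ++ p ++ "\n\n#if " ++ bCond e])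
      ++ (e :: tl.takeWhile (fun x => bCond x == bCond e)).flatMap bBody
      ++ bGroups (some (bCond e)) (tl.dropWhile (fun x => bCond x == bCond e)) := by
  rw [bGroups.eq_def]

theorem procA_eq_bGroups_aux (n : Nat) : ∀ (l : List String) (cur : Option String),
    l.length ≤ n →
    (cur = none ∨ ∃ p, cur = some p ∧ p ≠ "" ∧
      ∀ h, l.head? = some h → bCond h ≠ p) →
    procA cur l = bGroups cur l := by
  induction n with
  | zero =>
      intro l cur hlen hcur
      have hl : l = [] := List.eq_nil_of_length_eq_zero (Nat.le_zero.mp hlen)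
      subst hl
      rcases hcur with h | ⟨p, hp, hpne, _⟩
      · subst h; simp [procA, bGroups, processCondition]
      · subst hp
        rw [procA, processCondition_finish p hpne]
        simp [bGroups]
  | succ n ih =>
      intro l cur hlen hcur
      match l with
      | [] =>
          rcases hcur with h | ⟨p, hp, hpne, _⟩
          · subst h; simp [procA, bGroups, processCondition]
          · subst hp
            rw [procA, processCondition_finish p hpne]
            simp [bGroups]
      | e :: tl =>
          have hpre :
              (match (processCondition cur (computeCondition [e])).1 with
                | some s => [s] | none => ([] : List String))
                = (match cur with
                   | none => ["#if " ++ bCond e]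
                   | some p => ["#endif // " ++ p ++ "\n\n#if " ++ bCond e]) ∧
              (processCondition cur (computeCondition [e])).2 = some (bCond e) := by
            rcases hcur with h | ⟨p, hp, hpne, hhead⟩
            · subst h; rw [computeCondition_singleton, processCondition_none]; simp
            · subst hp
              have hne : bCond e ≠ p := hhead e rfl
              rw [computeCondition_singleton, processCondition_change p (bCond e) hpne hne]
              simp
          rw [procA]
          simp only [hpre.1, hpre.2]
          rw [procA_absorb tl (bCond e) (bCond_ne_empty e)]
          have hlen' : (tl.dropWhile (fun x => bCond x == bCond e)).length ≤ n := by
            have h1 := List.length_dropWhile_le (fun x => bCond x == bCond e) tl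
            simp only [List.length_cons] at hlen
            omega
          have hrec : procA (some (bCond e)) (tl.dropWhile (fun x => bCond x == bCond e))
              = bGroups (some (bCond e)) (tl.dropWhile (fun x => bCond x == bCond e)) := by
            apply ih _ _ hlen'
            refine Or.inr ⟨bCond e, rfl, bCond_ne_empty e, ?_⟩
            intro h hh hcontra
            have := List.head?_dropWhile_not (fun x => bCond x == bCond e) tl
            rw [hh] at this
            simp [hcontra] at this
          rw [hrec, bGroups_cons]
          rcases hcur with h | ⟨p, hp, _, _⟩
          · subst h; simp [List.flatMap_cons]
          · subst hp; simp [List.flatMap_cons]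

theorem procA_eq_bGroups (l : List String) (cur : Option String)
    (hcur : cur = none ∨ ∃ p, cur = some p ∧ p ≠ "" ∧
      ∀ h, l.head? = some h → bCond h ≠ p) :
    procA cur l = bGroups cur l :=
  procA_eq_bGroups_aux l.length l cur le_rfl hcur

-- ===== VERDICT (by name: the statement is the Claim_ definition above) =====
theorem generate_ext_check_spec : Claim_equal_generate_ext_check := by
  intro exts _
  unfold Spec_generate_ext_check generate_ext_check generate_ext_check_alt
  rw [foldA_eq_procA exts [] none, procA_eq_bGroups exts none (Or.inl rfl)]
  rfl
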